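-- pv_equiv track=rewrite | github.com/pablobernabeu1/Sistemas-Distribuidos | v2/API_Visitante.py | mapaToMatrix
-- ===== SOURCE A (Python) =====
-- def mapaToMatrix(mapa):
--     resultado = []
--     resultado.append([])
--     filas = 0
--
--     cabecera = "" # Variable para almacenar la cabecera del mapa
--     fin = 0 # Variable que guarda en que posicion termina la cabecera
--     aux = 0 # Variable que indica cuando termina la cabecera del mapa
--     cont = 0 # Variable que cuenta todos los caracteres recorridos
--     for x in mapa:
--         if x == "#":
--             aux += 1
--
--         if aux == 2:
--             fin = cont
--             break
--
--         cabecera += x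
--         cont += 1
--
--     mapa2 = mapa[fin + 1: len(mapa)]
--
--     for i in mapa2:
--         if i == "|":
--             if filas != 19:
--                 filas += 1
--                 resultado.append([])
--
--         elif i != " " and i != "|":
--             resultado[filas].append(str(i))
--
--     return cabecera, resultado
-- ===== SOURCE B (Python) =====
-- def mapaToMatrix(mapa):
--     # Scan the header: everything before the second '#'.
--     cabecera = ""
--     fin = 0
--     hashes = 0
--     for cont, x in enumerate(mapa):
--         if x == "#":
--             hashes += 1
--         if hashes == 2:
--             fin = cont
--             break
--         cabecera += x
--
--     cuerpo = mapa[fin + 1:]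
--
--     # Body: rows are the '|'-separated segments, spaces removed.
--     # The board is at most 20 rows tall; extra content goes into the last row.
--     segments = cuerpo.split("|")
--     if len(segments) > 20:
--         segments = segments[:19] + ["".join(segments[19:])]
--     return cabecera, [[c for c in seg if c != " "] for seg in segments]
-- ===== Notes on version B (the rewrite author's own statement) =====
-- stated objective: simpler
-- what changed: The header scan is kept, but the character-by-character body state machine (row counter, per-character appends into a mutated row list) is replaced by one str.split on the pipe delimiter with per-segment space filtering, with everything past the 20th row joined into the last row.
import Mathlib
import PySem

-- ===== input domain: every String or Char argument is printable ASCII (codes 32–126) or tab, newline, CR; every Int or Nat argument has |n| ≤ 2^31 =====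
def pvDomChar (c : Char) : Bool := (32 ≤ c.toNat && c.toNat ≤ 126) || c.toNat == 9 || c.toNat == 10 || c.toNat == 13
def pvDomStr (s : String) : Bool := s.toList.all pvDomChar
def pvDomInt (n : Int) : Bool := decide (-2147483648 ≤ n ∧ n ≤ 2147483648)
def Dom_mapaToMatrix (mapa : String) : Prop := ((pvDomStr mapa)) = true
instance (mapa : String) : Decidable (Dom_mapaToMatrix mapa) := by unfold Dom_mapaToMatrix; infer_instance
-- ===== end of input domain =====

-- B keeps the header scan but replaces A's per-character body state machine by a split-on-delimiter pass with per-segment filtering: a simpler decomposition of the same O(n) work.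


-- ===== PORT A =====
-- A's header for-loop (aux/cont counters, break at the second '#')
def pvAHeader : List Char → List Char → Nat → Nat → Nat → List Char × Nat
  | [], cab, fin, _, _ => (cab, fin)
  | x :: xs, cab, fin, aux, cont =>
    let aux' := if x = '#' then aux + 1 else aux
    if aux' = 2 then (cab, cont)
    else pvAHeader xs (cab ++ [x]) fin aux' (cont + 1)

-- one step of A's second for-loop: state (filas, resultado)
def pvABodyStep (st : Nat × List (List String)) (i : Char) : Nat × List (List String) :=
  if i = '|' then
    if st.1 ≠ 19 then (st.1 + 1, st.2 ++ [[]]) else st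
  else if i ≠ ' ' ∧ i ≠ '|' then
    (st.1, st.2.modify st.1 (fun r => r ++ [String.ofList [i]]))
  else st

def mapaToMatrix (mapa : String) : String × List (List String) :=
  let cs := mapa.toList
  let hd := pvAHeader cs [] 0 0 0
  let mapa2 := PySem.List.slice cs (some ((hd.2 : Int) + 1)) (some (cs.length : Int))
  let st := mapa2.foldl pvABodyStep (0, [[]])
  (String.ofList hd.1, st.2)

-- ===== PORT B =====
-- B's header for-loop over enumerate(mapa) (hashes counter, break at the second '#')
def pvBHeader : List (Int × Char) → List Char → Nat → List Char × Int
  | [], cab, _ => (cab, 0)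
  | (cont, x) :: rest, cab, hashes =>
    let h' := if x = '#' then hashes + 1 else hashes
    if h' = 2 then (cab, cont)
    else pvBHeader rest (cab ++ [x]) h'

-- [c for c in seg if c != ' ']  (Python's chars are 1-char strings)
def pvFiltRow (seg : List Char) : List String :=
  (seg.filter (fun c => decide (c ≠ ' '))).map (fun c => String.ofList [c])

def mapaToMatrix_alt (mapa : String) : String × List (List String) :=
  let cs := mapa.toList
  let hd := pvBHeader (PySem.List.enumerate cs 0) [] 0
  let cuerpo := PySem.List.slice cs (some (hd.2 + 1)) none
  let segments := PySem.Chars.splitOn cuerpo ['|']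
  let segments2 :=
    if segments.length > 20 then
      segments.take 19 ++ [(segments.drop 19).flatten]
    else segments
  (String.ofList hd.1, segments2.map pvFiltRow)

-- ===== PRECONDITION & SPEC =====
def Spec_mapaToMatrix (mapa : String) (out : String × List (List String)) : Prop := out = mapaToMatrix_alt mapa
instance (mapa : String) (out : String × List (List String)) : Decidable (Spec_mapaToMatrix mapa out) := by unfold Spec_mapaToMatrix; infer_instance

-- ===== CLAIM =====
def Claim_equal_mapaToMatrix : Prop := ∀ (mapa : String), Dom_mapaToMatrix mapa → Spec_mapaToMatrix mapa (mapaToMatrix mapa)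

-- ===== LEMMAS AND PROOFS =====

-- the two header loops run in lock-step
lemma header_equiv : ∀ (cs cab : List Char) (aux k : Nat),
    pvBHeader (PySem.List.enumerate cs (k : Int)) cab aux
      = ((pvAHeader cs cab 0 aux k).1, ((pvAHeader cs cab 0 aux k).2 : Int)) := by
  intro cs
  induction cs with
  | nil => intro cab aux k; simp [PySem.List.enumerate_nil, pvBHeader, pvAHeader]
  | cons x xs ih =>
    intro cab aux k
    rw [PySem.List.enumerate_cons]
    simp only [pvBHeader, pvAHeader]
    by_cases h2 : (if x = '#' then aux + 1 else aux) = 2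
    · simp [h2]
    · simp only [h2, if_false]
      rw [show (k : Int) + 1 = ((k + 1 : Nat) : Int) by push_cast; ring]
      exact ih (cab ++ [x]) _ (k + 1)

def pvSegs : List Char → List (List Char)
  | [] => [[]]
  | c :: cs => if c = '|' then [] :: pvSegs cs
      else match pvSegs cs with
        | [] => [[c]]
        | r :: rs => (c :: r) :: rs

lemma pvSegs_ne_nil (cs : List Char) : pvSegs cs ≠ [] := by
  cases cs with
  | nil => simp [pvSegs]
  | cons c cs =>
    simp only [pvSegs]
    split
    · simp
    · split <;> simp

def pvAttachC (x : List Char) : List (List Char) → List (List Char)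
  | [] => [x]
  | r :: rs => (x ++ r) :: rs

-- splitOn.go characterisation
lemma splitOn_go_eq (l : List Char) : ∀ (fuel : Nat) (cur : List Char) (acc : List (List Char)),
    l.length < fuel →
    PySem.Chars.splitOn.go ['|'] fuel l cur acc = acc.reverse ++ pvAttachC cur.reverse (pvSegs l) := by
  induction l with
  | nil =>
    intro fuel cur acc h
    match fuel with
    | f + 1 => simp [PySem.Chars.splitOn.go, pvSegs, pvAttachC]
  | cons c rest ih =>
    intro fuel cur acc h
    match fuel with
    | f + 1 =>
      by_cases hc : c = '|'
      · subst hc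
        have hpre : ['|'].isPrefixOf ('|' :: rest) = true := by simp [List.isPrefixOf]
        rw [PySem.Chars.splitOn.go]
        simp only [hpre, if_pos, List.length_cons, List.length_nil, List.drop_succ_cons, List.drop_zero]
        rw [ih f [] (cur.reverse :: acc) (by simpa using Nat.lt_of_succ_lt_succ h)]
        obtain ⟨r, rs, hr⟩ : ∃ r rs, pvSegs rest = r :: rs := by
          cases hh : pvSegs rest with
          | nil => exact absurd hh (pvSegs_ne_nil rest)
          | cons r rs => exact ⟨r, rs, rfl⟩
        simp [pvSegs, hr, pvAttachC]
      · have hpre : ['|'].isPrefixOf (c :: rest) = false := by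
          simp [List.isPrefixOf]
          intro hcc; exact hc hcc.symm
        rw [PySem.Chars.splitOn.go]
        simp only [hpre, Bool.false_eq_true, if_false]
        rw [ih f (c :: cur) acc (by simpa using Nat.lt_of_succ_lt_succ h)]
        obtain ⟨r, rs, hr⟩ : ∃ r rs, pvSegs rest = r :: rs := by
          cases hh : pvSegs rest with
          | nil => exact absurd hh (pvSegs_ne_nil rest)
          | cons r rs => exact ⟨r, rs, rfl⟩
        simp [pvSegs, hc, hr, pvAttachC]

lemma splitOn_eq_segs (l : List Char) : PySem.Chars.splitOn l ['|'] = pvSegs l := by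
  rw [PySem.Chars.splitOn, splitOn_go_eq l (l.length + 1) [] [] (Nat.lt_succ_self _)]
  obtain ⟨r, rs, hr⟩ : ∃ r rs, pvSegs l = r :: rs := by
    cases hh : pvSegs l with
    | nil => exact absurd hh (pvSegs_ne_nil l)
    | cons r rs => exact ⟨r, rs, rfl⟩
  simp [hr, pvAttachC]

def pvMerge : Nat → List String → List (List Char) → List (List String)
  | _, cur, [] => [cur]
  | b, cur, s :: ss =>
    if ss = [] then [cur ++ pvFiltRow s]
    else if b = 0 then [cur ++ pvFiltRow (s :: ss).flatten]
    else (cur ++ pvFiltRow s) :: pvMerge (b - 1) [] ss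

lemma pvMerge_zero (cur : List String) (ss : List (List Char)) (h : ss ≠ []) :
    pvMerge 0 cur ss = [cur ++ pvFiltRow ss.flatten] := by
  match ss with
  | [s] => simp [pvMerge]
  | s :: s2 :: t => simp [pvMerge]

lemma pvFiltRow_cons_sp (r : List Char) : pvFiltRow (' ' :: r) = pvFiltRow r := by
  simp [pvFiltRow]

lemma pvFiltRow_cons_ch (c : Char) (hc : c ≠ ' ') (r : List Char) :
    pvFiltRow (c :: r) = String.ofList [c] :: pvFiltRow r := by
  simp [pvFiltRow, hc]

lemma pvMerge_head_sp (b : Nat) (cur : List String) (r : List Char) (rs : List (List Char)) :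
    pvMerge b cur ((' ' :: r) :: rs) = pvMerge b cur (r :: rs) := by
  rcases rs with _ | ⟨r2, rs⟩
  · simp [pvMerge, pvFiltRow_cons_sp]
  · rcases b with _ | b
    · simp [pvMerge, List.flatten, pvFiltRow_cons_sp]
    · simp [pvMerge, pvFiltRow_cons_sp]

lemma pvMerge_head_ch (b : Nat) (cur : List String) (c : Char) (hc : c ≠ ' ')
    (r : List Char) (rs : List (List Char)) :
    pvMerge b cur ((c :: r) :: rs) = pvMerge b (cur ++ [String.ofList [c]]) (r :: rs) := by
  rcases rs with _ | ⟨r2, rs⟩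
  · simp [pvMerge, pvFiltRow_cons_ch c hc]
  · rcases b with _ | b
    · simp [pvMerge, List.flatten, pvFiltRow_cons_ch c hc]
    · simp [pvMerge, pvFiltRow_cons_ch c hc]

lemma modify_at_end {α : Type} (done : List α) (cur : α) (f : α → α) :
    (done ++ [cur]).modify done.length f = done ++ [f cur] := by
  induction done with
  | nil => simp [List.modify]
  | cons d t ih =>
    simp only [List.cons_append, List.modify]
    simp [List.modify] at ih
    simp [ih]

lemma body_fold (cs : List Char) : ∀ (k : Nat) (done : List (List String)) (cur : List String),
    done.length = k → k ≤ 19 →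
    (cs.foldl pvABodyStep (k, done ++ [cur])).2 = done ++ pvMerge (19 - k) cur (pvSegs cs) := by
  induction cs with
  | nil =>
    intro k done cur hlen hk
    simp [pvSegs, pvMerge, pvFiltRow]
  | cons c rest ih =>
    intro k done cur hlen hk
    obtain ⟨r, rs, hr⟩ : ∃ r rs, pvSegs rest = r :: rs := by
      cases hh : pvSegs rest with
      | nil => exact absurd hh (pvSegs_ne_nil rest)
      | cons r rs => exact ⟨r, rs, rfl⟩
    by_cases hc : c = '|'
    · subst hc
      by_cases hk19 : k = 19
      · subst hk19
        have hstep : pvABodyStep (19, done ++ [cur]) '|' = (19, done ++ [cur]) := by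
          simp [pvABodyStep]
        rw [List.foldl_cons, hstep, ih 19 done cur hlen (le_refl _)]
        simp only [pvSegs, if_pos, hr, Nat.sub_self]
        rw [pvMerge_zero cur (r :: rs) (by simp),
          pvMerge_zero cur ([] :: r :: rs) (by simp)]
        simp [List.flatten]
      · have hstep : pvABodyStep (k, done ++ [cur]) '|' = (k + 1, (done ++ [cur]) ++ [[]]) := by
          simp [pvABodyStep, hk19]
        rw [List.foldl_cons, hstep,
          ih (k + 1) (done ++ [cur]) [] (by simp [hlen]) (by omega)]
        simp only [pvSegs, if_pos, hr]
        have hM : pvMerge (19 - k) cur ([] :: r :: rs)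
            = (cur ++ pvFiltRow []) :: pvMerge (19 - (k + 1)) [] (r :: rs) := by
          rw [pvMerge, if_neg (by simp), if_neg (by omega)]
          rw [show 19 - k - 1 = 19 - (k + 1) by omega]
        rw [hM]
        simp [pvFiltRow]
    · by_cases hsp : c = ' '
      · subst hsp
        have hstep : pvABodyStep (k, done ++ [cur]) ' ' = (k, done ++ [cur]) := by
          simp [pvABodyStep]
        rw [List.foldl_cons, hstep, ih k done cur hlen hk]
        simp only [pvSegs, if_neg (by decide : ¬ (' ' = '|')), hr]
        rw [pvMerge_head_sp]
      · have hstep : pvABodyStep (k, done ++ [cur]) c =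
            (k, done ++ [cur ++ [String.ofList [c]]]) := by
          rw [pvABodyStep, if_neg hc, if_pos (by exact ⟨hsp, hc⟩)]
          rw [← hlen, modify_at_end]
        rw [List.foldl_cons, hstep, ih k done (cur ++ [String.ofList [c]]) hlen hk]
        simp only [pvSegs, if_neg hc, hr]
        rw [pvMerge_head_ch _ _ _ hsp]

def pvAttachS (cur : List String) : List (List String) → List (List String)
  | [] => [cur]
  | r :: rs => (cur ++ r) :: rs

lemma pvAttachS_nil_of_ne (X : List (List String)) (h : X ≠ []) : pvAttachS [] X = X := by
  cases X with
  | nil => exact absurd rfl h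
  | cons r rs => simp [pvAttachS]

lemma pvMerge_take_drop : ∀ (ss : List (List Char)), ss ≠ [] → ∀ (b : Nat) (cur : List String),
    pvMerge b cur ss = pvAttachS cur ((ss.take b).map pvFiltRow ++
      if ss.drop b = [] then [] else [pvFiltRow (ss.drop b).flatten]) := by
  intro ss
  induction ss with
  | nil => intro h; exact absurd rfl h
  | cons s t ih =>
    intro _ b cur
    cases t with
    | nil =>
      cases b with
      | zero => simp [pvMerge, pvAttachS, List.flatten]
      | succ b => simp [pvMerge, pvAttachS]
    | cons s2 t2 =>
      cases b with
      | zero => simp [pvMerge, pvAttachS]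
      | succ b =>
        rw [pvMerge, if_neg (by simp), if_neg (by omega)]
        simp only [Nat.add_sub_cancel]
        rw [ih (by simp) b []]
        have hX : ((s2 :: t2).take b).map pvFiltRow ++
            (if (s2 :: t2).drop b = [] then [] else [pvFiltRow ((s2 :: t2).drop b).flatten]) ≠ [] := by
          by_cases hd : (s2 :: t2).drop b = []
          · have : (s2 :: t2).length ≤ b := List.drop_eq_nil_iff.mp hd
            rw [List.take_of_length_le this]
            simp [hd]
          · simp [hd]
        rw [pvAttachS_nil_of_ne _ hX]
        simp only [List.take_succ_cons, List.drop_succ_cons, List.map_cons, List.cons_append]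
        rfl

-- A's fold over the body equals B's capped-split form
lemma body_eq (ms : List Char) :
    (ms.foldl pvABodyStep (0, [[]])).2 =
      (let segments := PySem.Chars.splitOn ms ['|']
       let segments2 :=
         if segments.length > 20 then
           segments.take 19 ++ [(segments.drop 19).flatten]
         else segments
       segments2.map pvFiltRow) := by
  have h0 : (ms.foldl pvABodyStep (0, [[]])).2 = pvMerge 19 [] (pvSegs ms) := by
    have := body_fold ms 0 [] [] rfl (by omega)
    simpa using this
  rw [h0]
  simp only [splitOn_eq_segs]
  set ss := pvSegs ms with hss
  have hne : ss ≠ [] := pvSegs_ne_nil ms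
  rw [pvMerge_take_drop ss hne 19 []]
  rcases hdrop : ss.drop 19 with _ | ⟨s, t⟩
  · -- at most 19 segments
    have hle : ss.length ≤ 19 := List.drop_eq_nil_iff.mp hdrop
    rw [List.take_of_length_le hle, if_pos rfl, List.append_nil,
      if_neg (by omega), pvAttachS_nil_of_ne _ (by simp [hne])]
  · rcases t with _ | ⟨s2, t2⟩
    · -- exactly 20 segments
      have hlen : ss.length = 20 := by
        have := congrArg List.length hdrop
        simp at this
        omega
      rw [if_neg (by simp), if_neg (by omega), pvAttachS_nil_of_ne _ (by simp)]
      have : ss = ss.take 19 ++ [s] := by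
        conv_lhs => rw [← List.take_append_drop 19 ss]
        rw [hdrop]
      conv_rhs => rw [this]
      simp [List.flatten]
    · -- more than 20 segments: overflow merged into the last row
      have hgt : ss.length > 20 := by
        have := congrArg List.length hdrop
        simp at this
        omega
      rw [if_neg (by simp), if_pos hgt, pvAttachS_nil_of_ne _ (by simp), ← hdrop]
      simp

lemma sliceA_eq (cs : List Char) (fin : Nat) :
    PySem.List.slice cs (some ((fin : Int) + 1)) (some ((cs.length : Int))) = cs.drop (fin + 1) := by
  rw [show ((fin : Int) + 1) = ((fin + 1 : Nat) : Int) by push_cast; ring]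
  rw [PySem.List.slice_natCast]
  exact List.take_of_length_le (by simp)

theorem main_eq (mapa : String) : mapaToMatrix mapa = mapaToMatrix_alt mapa := by
  have hh := header_equiv mapa.toList [] 0 0
  rw [show ((0 : Nat) : Int) = (0 : Int) from rfl] at hh
  unfold mapaToMatrix mapaToMatrix_alt
  simp only []
  rw [hh]
  rw [Prod.ext_iff]
  refine ⟨rfl, ?_⟩
  rw [sliceA_eq,
    show ((pvAHeader mapa.toList [] 0 0 0).2 : Int) + 1
        = (((pvAHeader mapa.toList [] 0 0 0).2 + 1 : Nat) : Int) by push_cast; ring,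
    PySem.List.slice_from_natCast, body_eq]

-- ===== VERDICT =====
theorem mapaToMatrix_spec : Claim_equal_mapaToMatrix := fun mapa _ => main_eq mapa
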